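-- pv_equiv track=rewrite | github.com/cajaun/school-workspace | Python/COMP1127/week8/hackerrank/620169526.py | closestLeapYear
-- ===== SOURCE A (Python) =====
-- def leapYear(year):
--
--   return (year % 4 == 0 and year % 100 != 0) or (year % 400 == 0)
--
-- def closestLeapYear(year):
--
--
--   if leapYear(year):
--     return year
--
--   futureYear = year + 1
--   pastYear = year - 1
--
--   while True:
--
--     if leapYear(pastYear) and leapYear(futureYear):
--
--         return pastYear if year - pastYear <= futureYear - year else futureYear
--     elif leapYear(pastYear):
--         return pastYear
--     elif leapYear(futureYear):
--         return futureYear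
--
--
--     pastYear -= 1
--     futureYear += 1
-- ===== SOURCE B (Python) =====
-- def leapYear(year):
--   return (year % 4 == 0 and year % 100 != 0) or (year % 400 == 0)
--
-- def closestLeapYear(year):
--   candidates = [y for y in range(year - 8, year + 9) if leapYear(y)]
--   return min(candidates, key=lambda y: (abs(y - year), y))
-- ===== Notes on version B (the rewrite author's own statement) =====
-- stated objective: simpler
-- what changed: Replaces the interleaved outward while-True search with a generate-then-select pass: build all leap years in the fixed window year-8..year+8 and take the min by the key (abs(y-year), y), whose tie-break reproduces the past-year preference.
import Mathlib
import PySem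

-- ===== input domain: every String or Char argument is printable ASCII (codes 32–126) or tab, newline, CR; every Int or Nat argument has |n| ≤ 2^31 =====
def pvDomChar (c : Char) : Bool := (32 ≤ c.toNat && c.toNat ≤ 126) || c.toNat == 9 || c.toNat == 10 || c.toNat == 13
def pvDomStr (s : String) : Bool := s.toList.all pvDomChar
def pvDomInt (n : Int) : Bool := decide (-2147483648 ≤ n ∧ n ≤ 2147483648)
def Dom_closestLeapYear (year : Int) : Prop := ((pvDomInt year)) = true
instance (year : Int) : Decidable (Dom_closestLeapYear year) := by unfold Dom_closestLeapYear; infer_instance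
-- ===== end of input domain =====

-- B replaces A's interleaved outward while-True search by generate-then-select over the
-- fixed window year-8..year+8 with min by key (abs(y-year), y); objective: simpler.

-- shared module-level helper of both Python files
def leapYear (year : Int) : Bool :=
  (PySem.Int.mod year 4 == 0 && !(PySem.Int.mod year 100 == 0)) || PySem.Int.mod year 400 == 0

-- ===== PORT A =====
-- A's 'while True' loop; the fuel 9 only makes it total (the loop returns within 4
-- iterations, see the proofs below), the 0-fuel default is never reached.
def closestLeapYearLoop (year : Int) (past fut : Int) : Nat → Int
  | 0 => past
  | n + 1 =>
    if leapYear past && leapYear fut then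
      (if year - past ≤ fut - year then past else fut)
    else if leapYear past then past
    else if leapYear fut then fut
    else closestLeapYearLoop year (past - 1) (fut + 1) n

def closestLeapYear (year : Int) : Int :=
  if leapYear year then year
  else closestLeapYearLoop year (year - 1) (year + 1) 9

-- ===== PORT B =====
-- min(candidates, key=lambda y: (abs(y - year), y)); the .getD 0 only makes the
-- empty-list ValueError case total (the window always contains a leap year).
def closestLeapYear_alt (year : Int) : Int :=
  (PySem.List.min2? ((PySem.List.pyRange (year - 8) (year + 9) 1).filter leapYear)
    (fun y => |y - year|) (fun y => y)).getD 0

-- ===== PRECONDITION & SPEC =====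
def Spec_closestLeapYear (year : Int) (out : Int) : Prop := out = closestLeapYear_alt year
instance (year : Int) (out : Int) : Decidable (Spec_closestLeapYear year out) := by unfold Spec_closestLeapYear; infer_instance

-- ===== CLAIM (what is proved, stated in full; the proofs are below) =====
def Claim_equal_closestLeapYear : Prop := ∀ (year : Int), Dom_closestLeapYear year → Spec_closestLeapYear year (closestLeapYear year)

-- ===== LEMMAS AND PROOFS =====

-- leapYear only depends on the year mod 400
theorem leap_congr (a b : Int) (h : a % 400 = b % 400) : leapYear a = leapYear b := by
  have h4 : a % 4 = b % 4 := by omega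
  have h100 : a % 100 = b % 100 := by omega
  simp only [leapYear,
    PySem.Int.mod_eq_emod_of_pos (b := 4) (by norm_num),
    PySem.Int.mod_eq_emod_of_pos (b := 100) (by norm_num),
    PySem.Int.mod_eq_emod_of_pos (b := 400) (by norm_num), h4, h100, h]

-- residue-level image of A's loop: the signed offset it returns
def offLoopA (r : Int) : Int → Nat → Int
  | k, 0 => -k
  | k, n + 1 =>
    if leapYear (r - k) then -k
    else if leapYear (r + k) then k
    else offLoopA r (k + 1) n

def offA (r : Int) : Int := if leapYear r then 0 else offLoopA r 1 9

theorem loopA_eq (n : Nat) : ∀ (y k : Int),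
    closestLeapYearLoop y (y - k) (y + k) n = y + offLoopA (y % 400) k n := by
  induction n with
  | zero => intro y k; simp [closestLeapYearLoop, offLoopA]; ring
  | succ n ih =>
    intro y k
    have hp : leapYear (y - k) = leapYear (y % 400 - k) := leap_congr _ _ (by omega)
    have hf : leapYear (y + k) = leapYear (y % 400 + k) := leap_congr _ _ (by omega)
    simp only [closestLeapYearLoop, offLoopA, hp, hf]
    by_cases h1 : leapYear (y % 400 - k) <;> by_cases h2 : leapYear (y % 400 + k) <;>
      simp [h1, h2, show y - (y - k) = k by ring, show y + k - y = k by ring]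
    · ring
    · ring
    · have h3 : y - k - 1 = y - (k + 1) := by ring
      have h4 : y + k + 1 = y + (k + 1) := by ring
      rw [h3, h4, ih]

theorem A_eq (y : Int) : closestLeapYear y = y + offA (y % 400) := by
  unfold closestLeapYear offA
  rw [leap_congr y (y % 400) (by omega)]
  by_cases h : leapYear (y % 400)
  · simp [h]
  · simp only [h, if_false, Bool.false_eq_true]
    exact loopA_eq 9 y 1

-- residue-level image of B: the window offsets and the selected offset
def offsets : List Int := [-8, -7, -6, -5, -4, -3, -2, -1, 0, 1, 2, 3, 4, 5, 6, 7, 8]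

def offB (r : Int) : Int :=
  (PySem.List.min2? (offsets.filter (fun d => leapYear (r + d)))
    (fun d => |d|) (fun d => d)).getD 0

theorem range_eq (y : Int) :
    PySem.List.pyRange (y - 8) (y + 9) 1 = offsets.map (fun d => y + d) := by
  rw [PySem.List.pyRange_one]
  have h17 : (y + 9 - (y - 8)).toNat = 17 := by omega
  rw [h17]
  rw [show List.range 17 = [0, 1, 2, 3, 4, 5, 6, 7, 8, 9, 10, 11, 12, 13, 14, 15, 16] from by decide]
  simp only [List.map_cons, List.map_nil, offsets, List.cons.injEq, and_true]
  norm_num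
  refine ⟨by ring, by ring, by ring, by ring, by ring, by ring, by ring, by ring, by ring,
    by ring, by ring, by ring, by ring, by ring, by ring, by ring⟩

-- generic fold facts, instantiated below at min2?'s fold
theorem foldl_map_rel {α β : Type} (f : α → β)
    (step : Option β → β → Option β) (step' : Option α → α → Option α)
    (h : ∀ (acc : Option α) (x : α), step (acc.map f) (f x) = (step' acc x).map f) :
    ∀ (l : List α) (acc0 : Option β) (acc : Option α), acc0 = acc.map f →
      List.foldl step acc0 (l.map f) = (List.foldl step' acc l).map f := by
  intro l
  induction l with
  | nil => intro acc0 acc hacc; simpa using hacc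
  | cons x t ih =>
    intro acc0 acc hacc
    simp only [List.map_cons, List.foldl_cons]
    exact ih _ (step' acc x) (by rw [hacc, h])

theorem foldl_some' {α : Type} (step : Option α → α → Option α)
    (h : ∀ (a : Option α) (x : α), a.isSome = true → (step a x).isSome = true) :
    ∀ (l : List α) (acc : Option α), acc.isSome = true →
      (List.foldl step acc l).isSome = true := by
  intro l
  induction l with
  | nil => intro acc hacc; simpa using hacc
  | cons x t ih => intro acc hacc; exact ih _ (h acc x hacc)

-- min2?'s fold commutes with shifting every element by y (the keys shift with it)
theorem min2_shift (l : List Int) (y : Int) :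
    PySem.List.min2? (l.map (fun d => y + d)) (fun c => |c - y|) (fun c => c)
    = Option.map (fun d => y + d)
        (PySem.List.min2? l (fun d => |d|) (fun d => d)) := by
  unfold PySem.List.min2?
  beta_reduce
  refine foldl_map_rel (fun d => y + d) _ _ ?_ l none none rfl
  intro acc x
  cases acc with
  | none => rfl
  | some m =>
    dsimp only [Option.map_some]
    have e1 : y + x - y = x := by ring
    have e2 : y + m - y = m := by ring
    rw [e1, e2]
    by_cases h1 : |x| < |m| <;> by_cases h2 : |m| < |x| <;> by_cases h3 : x < m <;>
      simp [h1, h2, h3]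

theorem min2_cons_some (d : Int) (t : List Int) :
    ∃ m, PySem.List.min2? (d :: t) (fun x => |x|) (fun x => x) = some m := by
  unfold PySem.List.min2?
  beta_reduce
  rw [List.foldl_cons]
  refine Option.isSome_iff_exists.mp (foldl_some' _ ?_ t _ rfl)
  intro a x ha
  cases a with
  | none => simp at ha
  | some m => dsimp only; split <;> rfl

set_option maxRecDepth 40000 in

theorem filter_nonempty : ∀ r ∈ PySem.List.pyRange 0 400 1,
    offsets.filter (fun d => leapYear (r + d)) ≠ [] := by decide

theorem B_eq (y : Int) : closestLeapYear_alt y = y + offB (y % 400) := by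
  unfold closestLeapYear_alt offB
  have hfc : (offsets.filter (fun d => leapYear (y + d))) =
      (offsets.filter (fun d => leapYear (y % 400 + d))) :=
    List.filter_congr (fun d _ => leap_congr _ _ (by omega))
  simp only [range_eq, List.filter_map, Function.comp_def]
  rw [hfc, min2_shift]
  have hmem : (y % 400) ∈ PySem.List.pyRange 0 400 1 := by
    rw [PySem.List.mem_pyRange_one]
    exact ⟨Int.emod_nonneg y (by norm_num), Int.emod_lt_of_pos y (by norm_num)⟩
  have hne := filter_nonempty (y % 400) hmem
  cases hl : offsets.filter (fun d => leapYear (y % 400 + d)) with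
  | nil => exact absurd hl hne
  | cons d t =>
    obtain ⟨m, hm⟩ := min2_cons_some d t
    rw [hm]
    simp

set_option maxRecDepth 40000 in
theorem off_eq : ∀ r ∈ PySem.List.pyRange 0 400 1, offA r = offB r := by decide

-- ===== VERDICT (by name: the statement is the Claim_ definition above) =====
theorem closestLeapYear_spec : Claim_equal_closestLeapYear := by
  intro y _
  unfold Spec_closestLeapYear
  rw [A_eq, B_eq]
  have hmem : (y % 400) ∈ PySem.List.pyRange 0 400 1 := by
    rw [PySem.List.mem_pyRange_one]
    exact ⟨Int.emod_nonneg y (by norm_num), Int.emod_lt_of_pos y (by norm_num)⟩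
  rw [off_eq (y % 400) hmem]
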